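-- pv_equiv track=rewrite | github.com/togasawara-cpu/mlb-japanese | scripts/fetch_stats.py | pick_mp4
-- ===== SOURCE A (Python) =====
-- from typing import Any
--
-- def pick_mp4(playbacks: list[dict[str, Any]]) -> str:
--     for pb in playbacks:
--         u = pb.get("url", "")
--         if "1280x720" in u and u.endswith(".mp4"):
--             return u
--     for pb in playbacks:
--         u = pb.get("url", "")
--         if u.endswith(".mp4"):
--             return u
--     return ""
-- ===== SOURCE B (Python) =====
-- def pick_mp4(playbacks):
--     fallback = None
--     for pb in playbacks:
--         u = pb.get("url", "")
--         if "1280x720" in u and u.endswith(".mp4"):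
--             return u
--         if fallback is None and u.endswith(".mp4"):
--             fallback = u
--     return fallback if fallback is not None else ""
-- ===== Notes on version B (the rewrite author's own statement) =====
-- stated objective: simpler
-- what changed: Replaces A's two full passes over playbacks with a single pass that returns a preferred 1280x720 .mp4 immediately and remembers only the first plain .mp4 as fallback.
import Mathlib
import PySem

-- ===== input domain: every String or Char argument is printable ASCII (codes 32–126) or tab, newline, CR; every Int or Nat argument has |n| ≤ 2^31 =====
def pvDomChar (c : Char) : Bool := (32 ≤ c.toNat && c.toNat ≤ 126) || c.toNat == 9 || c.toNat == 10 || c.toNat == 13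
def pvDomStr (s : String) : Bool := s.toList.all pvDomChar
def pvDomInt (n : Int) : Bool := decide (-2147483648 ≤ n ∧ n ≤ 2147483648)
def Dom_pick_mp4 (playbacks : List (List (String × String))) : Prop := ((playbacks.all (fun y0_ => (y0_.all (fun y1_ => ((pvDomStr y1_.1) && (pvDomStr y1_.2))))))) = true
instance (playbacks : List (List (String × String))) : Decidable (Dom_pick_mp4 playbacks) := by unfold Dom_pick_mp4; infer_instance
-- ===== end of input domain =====

-- B replaces A's two full passes with a single pass (return preferred match immediately, keep first plain .mp4 as fallback); same O(n), simpler flow.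


-- ===== PORT A =====
-- first loop of A: return the first url that contains "1280x720" and ends with ".mp4"
def pickLoopPref : List (List (String × String)) → Option String
  | [] => none
  | pb :: rest =>
    let u := PySem.Dict.getD (PySem.Dict.ofList pb) "url" ""
    if PySem.Str.isIn "1280x720" u && PySem.Str.endswith u ".mp4" then some u
    else pickLoopPref rest

-- second loop of A: return the first url that ends with ".mp4"
def pickLoopMp4 : List (List (String × String)) → Option String
  | [] => none
  | pb :: rest =>
    let u := PySem.Dict.getD (PySem.Dict.ofList pb) "url" ""
    if PySem.Str.endswith u ".mp4" then some u
    else pickLoopMp4 rest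

def pick_mp4 (playbacks : List (List (String × String))) : String :=
  match pickLoopPref playbacks with
  | some u => u
  | none =>
    match pickLoopMp4 playbacks with
    | some u => u
    | none => ""

-- ===== PORT B =====
-- B's single loop, carrying the first-seen plain-.mp4 fallback
def pickGo : List (List (String × String)) → Option String → String
  | [], fallback => fallback.getD ""
  | pb :: rest, fallback =>
    let u := PySem.Dict.getD (PySem.Dict.ofList pb) "url" ""
    if PySem.Str.isIn "1280x720" u && PySem.Str.endswith u ".mp4" then u
    else pickGo rest (if fallback.isNone && PySem.Str.endswith u ".mp4" then some u else fallback)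

def pick_mp4_alt (playbacks : List (List (String × String))) : String :=
  pickGo playbacks none

-- ===== PRECONDITION & SPEC =====
def Spec_pick_mp4 (playbacks : List (List (String × String))) (out : String) : Prop := out = pick_mp4_alt playbacks
instance (playbacks : List (List (String × String))) (out : String) : Decidable (Spec_pick_mp4 playbacks out) := by unfold Spec_pick_mp4; infer_instance

-- ===== CLAIM (what is proved, stated in full; the proofs are below) =====
def Claim_equal_pick_mp4 : Prop := ∀ (playbacks : List (List (String × String))), Dom_pick_mp4 playbacks → Spec_pick_mp4 playbacks (pick_mp4 playbacks)

-- ===== LEMMAS AND PROOFS =====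
-- invariant of B's loop: a later preferred match wins; otherwise the carried fallback, then A's second scan
theorem pickGo_eq (l : List (List (String × String))) (fb : Option String) :
    pickGo l fb =
      match pickLoopPref l with
      | some u => u
      | none => (fb.orElse (fun _ => pickLoopMp4 l)).getD "" := by
  induction l generalizing fb with
  | nil => cases fb <;> simp [pickGo, pickLoopPref, pickLoopMp4, Option.orElse]
  | cons pb rest ih =>
    cases fb <;>
      simp only [pickGo, pickLoopPref, pickLoopMp4, ih, Option.isNone_none, Option.isNone_some,
        Bool.true_and, Bool.false_and, Bool.and_eq_true] <;>
      split_ifs with h1 h2 <;>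
      first
        | rfl
        | (cases h : pickLoopPref rest <;> simp_all [Option.orElse])

-- ===== VERDICT (by name: the statement is the Claim_ definition above) =====
theorem pick_mp4_spec : Claim_equal_pick_mp4 := by
  intro playbacks _
  unfold Spec_pick_mp4 pick_mp4 pick_mp4_alt
  rw [pickGo_eq]
  cases pickLoopPref playbacks <;> cases pickLoopMp4 playbacks <;> simp [Option.orElse]
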